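-- pv_equiv track=rewrite | github.com/Robert-Marshall01/GreyThink | 01-Python/Grey Compiler/grey/tools/formatter.py | _normalize_semicolons
-- ===== SOURCE A (Python) =====
-- def _normalize_semicolons(line: str) -> str:
--     """Remove space before semicolons."""
--     result = []
--     in_string = False
--     for i, ch in enumerate(line):
--         if ch in ('"', "'") and (i == 0 or line[i - 1] != "\\"):
--             in_string = not in_string
--         if not in_string and ch == ";":
--             while result and result[-1] == " ":
--                 result.pop()
--             result.append(";")
--         else:
--             result.append(ch)
--     return "".join(result)
-- ===== SOURCE B (Python) =====
-- def _normalize_semicolons(line: str) -> str: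
--     """Remove space before semicolons."""
--     # Pass 1: partition the line into segments tagged outside/inside string,
--     # using the same quote-toggle rule as the original.
--     segs = []
--     cur = []
--     cur_out = True
--     in_string = False
--     for i, ch in enumerate(line):
--         if ch in ('"', "'") and (i == 0 or line[i - 1] != "\\"):
--             in_string = not in_string
--         out = not in_string
--         if out != cur_out:
--             segs.append((cur_out, cur))
--             cur = []
--             cur_out = out
--         cur.append(ch)
--     segs.append((cur_out, cur))
--     # Pass 2: in outside-string segments, drop spaces whose next kept char is ';'
--     # (a right-to-left sweep); inside-string segments are kept verbatim.
--     res = []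
--     for out, text in segs:
--         if out:
--             kept = []
--             for ch in reversed(text):
--                 if ch == " " and kept and kept[-1] == ";":
--                     continue
--                 kept.append(ch)
--             kept.reverse()
--             res.append("".join(kept))
--         else:
--             res.append("".join(text))
--     return "".join(res)
-- ===== Notes on version B (the rewrite author's own statement) =====
-- stated objective: alternative
-- what changed: Replaces the fused forward loop with a pop-back while by a two-pass pipeline: first partition the line into inside/outside-string segments with the same quote-toggle rule, then rewrite each outside segment with a right-to-left sweep that drops spaces immediately preceding a semicolon and concatenate the segments.
import Mathlib
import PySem

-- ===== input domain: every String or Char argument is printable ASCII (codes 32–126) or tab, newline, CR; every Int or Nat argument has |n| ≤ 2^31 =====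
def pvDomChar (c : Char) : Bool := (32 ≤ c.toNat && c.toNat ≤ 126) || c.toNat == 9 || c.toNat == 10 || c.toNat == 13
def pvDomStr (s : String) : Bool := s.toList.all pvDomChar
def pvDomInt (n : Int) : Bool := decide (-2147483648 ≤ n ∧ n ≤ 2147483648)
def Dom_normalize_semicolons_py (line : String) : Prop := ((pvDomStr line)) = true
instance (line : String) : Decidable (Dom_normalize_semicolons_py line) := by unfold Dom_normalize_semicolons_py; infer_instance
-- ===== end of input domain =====

-- B changes the decomposition (segment the line by string-state, then strip spaces
-- before ';' per outside segment right-to-left); objective: alternative, not faster.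

-- ===== PORT A =====
-- The Python result list is kept REVERSED here: `append` is cons, the pop-back
-- `while result and result[-1] == " ": result.pop()` is `dropWhile (· == ' ')`.
-- `line[i-1]` is only read when i ≥ 1, hence always in range: `getD` is exact there.
def normAGo (line : List Char) : Nat → Bool → List Char → List Char → List Char
  | _, _, res, [] => res
  | i, ins, res, ch :: rest =>
    if !(if (ch == '"' || ch == '\'') && (i == 0 || line.getD (i-1) ' ' != '\\') then !ins else ins) && ch == ';' then
      normAGo line (i+1) (if (ch == '"' || ch == '\'') && (i == 0 || line.getD (i-1) ' ' != '\\') then !ins else ins) (';' :: res.dropWhile (fun c => c == ' ')) rest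
    else
      normAGo line (i+1) (if (ch == '"' || ch == '\'') && (i == 0 || line.getD (i-1) ' ' != '\\') then !ins else ins) (ch :: res) rest

def normalize_semicolons_py (line : String) : String :=
  String.mk ((normAGo line.toList 0 false [] line.toList).reverse)

-- ===== PORT B =====
-- Pass 1: segmentation (cur is kept reversed, cons = append; segments flushed in order;
-- same in-range `line[i-1]` note as above).
def segGo (line : List Char) : Nat → Bool → Bool → List Char → List (Bool × List Char) → List Char → List (Bool × List Char)
  | _, _, curOut, cur, segs, [] => segs ++ [(curOut, cur.reverse)]
  | i, ins, curOut, cur, segs, ch :: rest =>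
    if (!(if (ch == '"' || ch == '\'') && (i == 0 || line.getD (i-1) ' ' != '\\') then !ins else ins)) != curOut then
      segGo line (i+1) (if (ch == '"' || ch == '\'') && (i == 0 || line.getD (i-1) ' ' != '\\') then !ins else ins) (!(if (ch == '"' || ch == '\'') && (i == 0 || line.getD (i-1) ' ' != '\\') then !ins else ins)) [ch] (segs ++ [(curOut, cur.reverse)]) rest
    else
      segGo line (i+1) (if (ch == '"' || ch == '\'') && (i == 0 || line.getD (i-1) ' ' != '\\') then !ins else ins) curOut (ch :: cur) segs rest

-- Pass 2, one step of the right-to-left sweep: Python's `kept[-1]` is `acc.head?`.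
def ssStep (ch : Char) (acc : List Char) : List Char :=
  if ch == ' ' && acc.head? == some ';' then acc else ch :: acc

-- Pass 2 transform of one outside segment: the Python reversed-iteration loop is a foldr.
def stripSemi (seg : List Char) : List Char := seg.foldr ssStep []

-- The final join over segments.
def renderB (segs : List (Bool × List Char)) : List Char :=
  (segs.map (fun s => if s.1 then stripSemi s.2 else s.2)).flatten

def normalize_semicolons_py_alt (line : String) : String :=
  String.mk (renderB (segGo line.toList 0 false true [] [] line.toList))

-- ===== PRECONDITION & SPEC =====
def Spec_normalize_semicolons_py (line : String) (out : String) : Prop := out = normalize_semicolons_py_alt line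
instance (line : String) (out : String) : Decidable (Spec_normalize_semicolons_py line out) := by unfold Spec_normalize_semicolons_py; infer_instance

-- ===== CLAIM (what is proved, stated in full; the proofs are below) =====
def Claim_equal_normalize_semicolons_py : Prop := ∀ (line : String), Dom_normalize_semicolons_py line → Spec_normalize_semicolons_py line (normalize_semicolons_py line)

-- ===== LEMMAS AND PROOFS =====

def rstripSp (x : List Char) : List Char := (x.reverse.dropWhile (fun c => c == ' ')).reverse

-- dropWhile passes over an append when the boundary element is kept
theorem dropWhile_append_cons {p : Char → Bool} {c : Char} (l m : List Char) (hc : p c = false) :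
    (l ++ c :: m).dropWhile p = l.dropWhile p ++ c :: m := by
  induction l with
  | nil => simp [List.dropWhile, hc]
  | cons a t ih =>
    by_cases ha : p a
    · simp [List.dropWhile, ha, ih]
    · simp [List.dropWhile, ha]

theorem rstripSp_cons_nonspace {c : Char} (x : List Char) (hc : c ≠ ' ') :
    rstripSp (c :: x) = c :: rstripSp x := by
  unfold rstripSp
  rw [show (c :: x).reverse = x.reverse ++ c :: [] by simp]
  rw [dropWhile_append_cons _ _ (by simpa using hc)]
  simp

theorem rstripSp_cons_ne_nil {c : Char} (x : List Char) (hx : rstripSp x ≠ []) :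
    rstripSp (c :: x) = c :: rstripSp x := by
  unfold rstripSp at *
  rw [show (c :: x).reverse = x.reverse ++ c :: [] by simp]
  have h : x.reverse.dropWhile (fun c => c == ' ') ≠ [] := by
    intro h; exact hx (by simp [h])
  rw [List.dropWhile_append]
  simp [h]

theorem rstripSp_nil_all_space (x : List Char) (hx : rstripSp x = []) :
    ∀ a ∈ x, a = ' ' := by
  intro a ha
  unfold rstripSp at hx
  have h0 : x.reverse.dropWhile (fun c => c == ' ') = [] := by
    cases h : x.reverse.dropWhile (fun c => c == ' ') with
    | nil => rfl
    | cons b t => simp [h] at hx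
  have := List.dropWhile_eq_nil_iff.mp h0
  simpa using this a (by simpa using ha)

theorem all_space_rstripSp_nil (x : List Char) (hx : ∀ a ∈ x, a = ' ') :
    rstripSp x = [] := by
  unfold rstripSp
  have : x.reverse.dropWhile (fun c => c == ' ') = [] := by
    apply List.dropWhile_eq_nil_iff.mpr
    intro a ha
    simp [hx a (by simpa using ha)]
  simp [this]

theorem head?_rstripSp (x : List Char) (hx : rstripSp x ≠ []) :
    (rstripSp x).head? = x.head? := by
  cases x with
  | nil => simp [rstripSp] at hx ⊢
  | cons c t =>
    by_cases hc : c = ' '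
    · subst hc
      by_cases ht : rstripSp t = []
      · exfalso
        exact hx (all_space_rstripSp_nil _ (by
          intro a ha
          rcases List.mem_cons.mp ha with h | h
          · exact h
          · exact rstripSp_nil_all_space t ht a h))
      · rw [rstripSp_cons_ne_nil t ht]; simp
    · rw [rstripSp_cons_nonspace t hc]; simp

theorem ssStep_keep {d : Char} {x : List Char} (h : ¬(d = ' ' ∧ x.head? = some ';')) :
    ssStep d x = d :: x := by
  unfold ssStep
  rw [if_neg]
  simpa using h

theorem ssStep_drop {x : List Char} (h : x.head? = some ';') :
    ssStep ' ' x = x := by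
  unfold ssStep
  rw [if_pos]
  simp [h]

theorem ssStep_nonspace {d : Char} (x : List Char) (hd : d ≠ ' ') :
    ssStep d x = d :: x :=
  ssStep_keep (fun h => hd h.1)

-- appending a non-semicolon char commutes with the sweep step
theorem ssStep_append_ne (d c : Char) (x : List Char) (hc : c ≠ ';') :
    ssStep d (x ++ [c]) = ssStep d x ++ [c] := by
  cases x with
  | nil =>
    rw [ssStep_keep (fun h => hc (by simpa using h.2)), ssStep_keep (by simp)]
    simp
  | cons y ys =>
    by_cases h : d = ' ' ∧ y = ';'
    · obtain ⟨h1, h2⟩ := h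
      subst h1; subst h2
      rw [show (';' :: ys ++ [c]) = ';' :: (ys ++ [c]) by simp]
      rw [ssStep_drop (by simp), ssStep_drop (by simp)]
      simp
    · rw [show (y :: ys ++ [c]) = y :: (ys ++ [c]) by simp]
      rw [ssStep_keep (by simpa using h), ssStep_keep (by simpa using h)]
      simp

theorem stripSemi_append_ne (s : List Char) (c : Char) (hc : c ≠ ';') :
    stripSemi (s ++ [c]) = stripSemi s ++ [c] := by
  induction s with
  | nil =>
    show ssStep c [] = _
    rw [ssStep_keep (by simp)]
    simp [stripSemi]
  | cons d t ih =>
    show ssStep d (stripSemi (t ++ [c])) = ssStep d (stripSemi t) ++ [c]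
    rw [ih, ssStep_append_ne _ _ _ hc]

-- one sweep step after appending ';' : the step distributes over the rstrip
theorem ssStep_rstrip_semi (d : Char) (x : List Char) :
    ssStep d (rstripSp x ++ [';']) = rstripSp (ssStep d x) ++ [';'] := by
  by_cases hd : d = ' '
  · subst hd
    by_cases hx : rstripSp x = []
    · rw [hx, List.nil_append, ssStep_drop (by simp)]
      have hall := rstripSp_nil_all_space x hx
      have hh : ¬(' ' = ' ' ∧ x.head? = some ';') := by
        rintro ⟨-, h⟩
        cases x with
        | nil => simp at h
        | cons y ys =>
          have : y = ';' := by simpa using h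
          have : y = ' ' := hall y (by simp)
          simp_all
      rw [ssStep_keep hh]
      rw [all_space_rstripSp_nil _ (by
        intro a ha
        rcases List.mem_cons.mp ha with h | h
        · exact h
        · exact hall a h)]
      simp
    · have hhead : (rstripSp x ++ [';']).head? = x.head? := by
        cases h : rstripSp x with
        | nil => exact absurd h hx
        | cons y ys => rw [← h, ← head?_rstripSp x hx]; simp [h]
      by_cases hy : x.head? = some ';'
      · rw [ssStep_drop (by rw [hhead]; exact hy), ssStep_drop hy]
      · rw [ssStep_keep (by rw [hhead]; exact fun h => hy h.2),
            ssStep_keep (fun h => hy h.2),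
            rstripSp_cons_ne_nil x hx]
        simp
  · rw [ssStep_nonspace _ hd, ssStep_nonspace _ hd, rstripSp_cons_nonspace x hd]
    simp

-- appending ';' strips the trailing spaces of the transformed prefix
theorem stripSemi_append_semi (s : List Char) :
    stripSemi (s ++ [';']) = rstripSp (stripSemi s) ++ [';'] := by
  induction s with
  | nil =>
    show ssStep ';' [] = _
    rw [ssStep_keep (by simp)]
    simp [stripSemi, rstripSp]
  | cons d t ih =>
    show ssStep d (stripSemi (t ++ [';'])) = _
    rw [ih, ssStep_rstrip_semi]
    rfl

theorem renderB_append_one (segs : List (Bool × List Char)) (b : Bool) (l : List Char) :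
    renderB (segs ++ [(b, l)]) = renderB segs ++ (if b then stripSemi l else l) := by
  simp [renderB]

theorem stripSemi_singleton (c : Char) : stripSemi [c] = [c] := by
  show ssStep c [] = [c]
  rw [ssStep_keep (by simp)]

-- the crucial boundary fact: popping trailing spaces never crosses into
-- already-closed segments, because the current segment starts with a quote
theorem dropWhile_boundary (C R : List Char) (c0 : Char) (s' : List Char)
    (hC : C = c0 :: s') (hc0 : c0 ≠ ' ') :
    (C.reverse ++ R).dropWhile (fun c => c == ' ') = C.reverse.dropWhile (fun c => c == ' ') ++ R := by
  subst hC
  rw [show (c0 :: s').reverse = s'.reverse ++ c0 :: [] by simp]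
  rw [List.append_assoc, List.singleton_append]
  rw [dropWhile_append_cons _ _ (by simpa using hc0), dropWhile_append_cons _ _ (by simpa using hc0)]
  simp

-- MAIN invariant: A's (reversed) accumulator tracks the rendered segmentation
theorem mainInv (rest : List Char) : ∀ (line : List Char) (i : Nat) (ins curOut : Bool)
    (cur : List Char) (segs : List (Bool × List Char)) (res : List Char),
    curOut = !ins →
    res = (renderB segs ++ (if curOut then stripSemi cur.reverse else cur.reverse)).reverse →
    (segs ≠ [] → ∃ c0 s', cur.reverse = c0 :: s' ∧ c0 ≠ ' ') →
    normAGo line i ins res rest = (renderB (segGo line i ins curOut cur segs rest)).reverse := by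
  induction rest with
  | nil =>
    intro line i ins curOut cur segs res hco hres hsc
    rw [show normAGo line i ins res [] = res from rfl,
        show segGo line i ins curOut cur segs [] = segs ++ [(curOut, cur.reverse)] from rfl,
        renderB_append_one]
    exact hres
  | cons ch rest ih =>
    intro line i ins curOut cur segs res hco hres hsc
    rw [show normAGo line i ins res (ch :: rest) =
      (if !(if (ch == '"' || ch == '\'') && (i == 0 || line.getD (i-1) ' ' != '\\') then !ins else ins) && ch == ';' then
        normAGo line (i+1) (if (ch == '"' || ch == '\'') && (i == 0 || line.getD (i-1) ' ' != '\\') then !ins else ins) (';' :: res.dropWhile (fun c => c == ' ')) rest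
      else
        normAGo line (i+1) (if (ch == '"' || ch == '\'') && (i == 0 || line.getD (i-1) ' ' != '\\') then !ins else ins) (ch :: res) rest) from rfl]
    rw [show segGo line i ins curOut cur segs (ch :: rest) =
      (if (!(if (ch == '"' || ch == '\'') && (i == 0 || line.getD (i-1) ' ' != '\\') then !ins else ins)) != curOut then
        segGo line (i+1) (if (ch == '"' || ch == '\'') && (i == 0 || line.getD (i-1) ' ' != '\\') then !ins else ins) (!(if (ch == '"' || ch == '\'') && (i == 0 || line.getD (i-1) ' ' != '\\') then !ins else ins)) [ch] (segs ++ [(curOut, cur.reverse)]) rest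
      else
        segGo line (i+1) (if (ch == '"' || ch == '\'') && (i == 0 || line.getD (i-1) ' ' != '\\') then !ins else ins) curOut (ch :: cur) segs rest) from rfl]
    generalize hI : (if (ch == '"' || ch == '\'') && (i == 0 || line.getD (i-1) ' ' != '\\') then !ins else ins) = I
    by_cases hflush : ((!I) != curOut) = true
    · -- a quote toggled the string state: flush the current segment
      have hne : I ≠ ins := by
        intro h
        subst h
        rw [hco] at hflush
        simp at hflush
      have hquote : (ch == '"' || ch == '\'') = true := by
        by_contra h
        simp only [Bool.not_eq_true] at h
        rw [if_neg (by simp [h])] at hI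
        exact hne hI.symm
      have hchq : ch = '"' ∨ ch = '\'' := by
        rcases Bool.or_eq_true_iff.mp hquote with h | h
        · exact Or.inl (by simpa using h)
        · exact Or.inr (by simpa using h)
      have hchs : (ch == ';') = false := by
        rcases hchq with h | h <;> (subst h; decide)
      have hchsp : ch ≠ ' ' := by
        rcases hchq with h | h <;> (subst h; decide)
      rw [if_pos hflush, if_neg (by simp [hchs])]
      apply ih
      · simp
      · rw [renderB_append_one]
        have hC' : (if !I then stripSemi [ch].reverse else [ch].reverse) = [ch] := by
          cases I <;> simp [stripSemi_singleton]
        rw [hC']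
        rw [hres]
        simp
      · intro _
        exact ⟨ch, [], by simp, hchsp⟩
    · -- no toggle of the output flag: same segment continues
      have hIeq : (!I) = curOut := by
        by_contra hne2
        exact hflush (bne_iff_ne.mpr hne2)
      have hIins2 : I = ins := by
        rw [hco] at hIeq
        cases I <;> cases ins <;> first | rfl | simp at hIeq
      rw [if_neg hflush]
      by_cases hsemi : (!I && ch == ';') = true
      · -- outside-string semicolon: pop trailing spaces / strip the transformed prefix
        have hIf : I = false := by
          rcases Bool.and_eq_true_iff.mp hsemi with ⟨h, -⟩
          cases I
          · rfl
          · simp at h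
        have hch : ch = ';' := by
          rcases Bool.and_eq_true_iff.mp hsemi with ⟨-, h⟩
          simpa using h
        have hcoT : curOut = true := by rw [← hIeq, hIf]; rfl
        subst hch
        subst hcoT
        rw [if_pos hsemi]
        rw [if_pos rfl] at hres
        apply ih
        · rw [hIf]; rfl
        · rw [if_pos rfl]
          rw [show (';' :: cur).reverse = cur.reverse ++ [';'] by simp]
          rw [stripSemi_append_semi]
          rw [hres]
          rw [List.reverse_append, List.reverse_append]
          rw [show (rstripSp (stripSemi cur.reverse) ++ [';']).reverse
              = ';' :: (stripSemi cur.reverse).reverse.dropWhile (fun c => c == ' ') by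
            rw [List.reverse_append]
            simp [rstripSp]]
          by_cases hsegs : segs = []
          · subst hsegs
            simp [renderB]
          · obtain ⟨c0, s', hcr, hc0⟩ := hsc hsegs
            have hCc : stripSemi cur.reverse = c0 :: stripSemi s' := by
              rw [hcr]
              show ssStep c0 (stripSemi s') = _
              exact ssStep_nonspace _ hc0
            rw [dropWhile_boundary _ _ _ _ hCc hc0]
            simp
        · intro hsegs
          obtain ⟨c0, s', hcr, hc0⟩ := hsc hsegs
          exact ⟨c0, s' ++ [';'], by simp [hcr], hc0⟩
      · -- plain character: appended verbatim on both sides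
        rw [if_neg hsemi]
        apply ih
        · rw [hIins2]; exact hco
        · cases hcu : curOut with
          | false =>
            rw [hcu] at hres
            simp only [if_neg (show ¬(false = true) by decide)] at hres ⊢
            rw [hres]
            simp
          | true =>
            have hIe2 : (!I) = true := hcu ▸ hIeq
            have hchs : ch ≠ ';' := by
              intro h
              subst h
              exact hsemi (by simp [hIe2])
            rw [hcu] at hres
            rw [if_pos rfl] at hres
            rw [if_pos rfl]
            rw [show (ch :: cur).reverse = cur.reverse ++ [ch] by simp]
            rw [stripSemi_append_ne _ _ hchs]
            rw [hres]
            simp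
        · intro hsegs
          obtain ⟨c0, s', hcr, hc0⟩ := hsc hsegs
          exact ⟨c0, s' ++ [ch], by simp [hcr], hc0⟩

-- ===== VERDICT (by name: the statement is the Claim_ definition above) =====
theorem normalize_semicolons_py_spec : Claim_equal_normalize_semicolons_py := by
  intro line _
  show normalize_semicolons_py line = normalize_semicolons_py_alt line
  unfold normalize_semicolons_py normalize_semicolons_py_alt
  rw [mainInv line.toList line.toList 0 false true [] [] [] rfl (by simp [renderB, stripSemi]) (by simp)]
  simp
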